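-- pv_equiv track=rewrite | github.com/hoang-himself/OCR-Docker | back/text_to_coordinate.py | remove_multi_dots
-- ===== SOURCE A (Python) =====
-- def remove_multi_dots(fail_coordinate):
--     number_dots = 0
--     one_dot_coordinate = []
--     for char in fail_coordinate:
--         if char == '.':
--             number_dots += 1
--
--     # only have 1 dot
--     if number_dots == 1:
--         return fail_coordinate
--     else:
--         for char in fail_coordinate:
--             if char == '.' and number_dots != 1:
--                 number_dots -= 1
--             else:
--                 one_dot_coordinate.append(char)
--
--         return "".join(one_dot_coordinate)
-- ===== SOURCE B (Python) =====
-- def remove_multi_dots(fail_coordinate):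
--     head, sep, tail = fail_coordinate.rpartition('.')
--     if not sep:
--         return fail_coordinate
--     return head.replace('.', '') + '.' + tail
-- ===== Notes on version B (the rewrite author's own statement) =====
-- stated objective: idiomatic
-- what changed: Replaces A's count-the-dots pass plus a counting filter loop with a single rpartition at the last dot followed by a replace on the prefix.
import Mathlib
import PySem

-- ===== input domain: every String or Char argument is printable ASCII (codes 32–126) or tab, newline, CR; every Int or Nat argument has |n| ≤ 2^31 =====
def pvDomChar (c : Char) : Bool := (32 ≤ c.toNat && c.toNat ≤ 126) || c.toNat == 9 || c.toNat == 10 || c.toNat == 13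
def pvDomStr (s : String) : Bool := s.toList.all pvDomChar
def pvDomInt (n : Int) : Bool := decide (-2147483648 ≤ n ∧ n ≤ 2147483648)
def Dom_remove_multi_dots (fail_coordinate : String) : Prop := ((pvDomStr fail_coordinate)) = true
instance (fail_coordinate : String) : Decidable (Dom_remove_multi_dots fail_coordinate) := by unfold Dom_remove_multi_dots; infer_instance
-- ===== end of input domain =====

-- B replaces A's two passes (count all dots, then filter while decrementing) with one
-- rpartition at the last dot plus a replace on the prefix (idiomatic; same cost).

-- ===== PORT A =====
def remove_multi_dots (fail_coordinate : String) : String :=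
  let l := fail_coordinate.toList
  let number_dots : Int := l.foldl (fun n c => if c = '.' then n + 1 else n) 0
  if number_dots = 1 then fail_coordinate
  else
    let st := l.foldl
      (fun (st : Int × List Char) c =>
        if c = '.' ∧ st.1 ≠ 1 then (st.1 - 1, st.2) else (st.1, st.2 ++ [c]))
      (number_dots, [])
    String.ofList st.2

-- ===== PORT B =====
-- rpartition('.') ported by hand (exact): reverse and split at the first '.' of the
-- reversed list = the last '.' of the string; str.replace('.', '') = filter (· ≠ '.').
def remove_multi_dots_alt (fail_coordinate : String) : String :=
  match fail_coordinate.toList.reverse.span (· ≠ '.') with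
  | (_, []) => fail_coordinate
  | (tailRev, _ :: headRev) =>
      String.ofList ((headRev.reverse.filter (· ≠ '.')) ++ '.' :: tailRev.reverse)

-- ===== PRECONDITION & SPEC =====
def Spec_remove_multi_dots (fail_coordinate : String) (out : String) : Prop := out = remove_multi_dots_alt fail_coordinate
instance (fail_coordinate : String) (out : String) : Decidable (Spec_remove_multi_dots fail_coordinate out) := by unfold Spec_remove_multi_dots; infer_instance

-- ===== CLAIM (what is proved, stated in full; the proofs are below) =====
def Claim_equal_remove_multi_dots : Prop := ∀ (fail_coordinate : String), Dom_remove_multi_dots fail_coordinate → Spec_remove_multi_dots fail_coordinate (remove_multi_dots fail_coordinate)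

-- ===== LEMMAS AND PROOFS =====

-- common spec: drop every '.' that has another '.' after it
def gSpec : List Char → List Char
  | [] => []
  | c :: l => if c = '.' ∧ '.' ∈ l then gSpec l else c :: gSpec l

-- recursive form of A's second loop
def recA : Int → List Char → List Char
  | _, [] => []
  | n, c :: l => if c = '.' ∧ n ≠ 1 then recA (n - 1) l else c :: recA n l

theorem foldl_count (l : List Char) (n : Int) :
    l.foldl (fun n c => if c = '.' then n + 1 else n) n = n + (l.count '.' : Int) := by
  induction l generalizing n with
  | nil => simp
  | cons c l ih =>
    by_cases h : c = '.' <;> simp [List.foldl, h, ih, List.count_cons] <;> ring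

theorem foldl_recA (l : List Char) (n : Int) (acc : List Char) :
    (l.foldl
      (fun (st : Int × List Char) c =>
        if c = '.' ∧ st.1 ≠ 1 then (st.1 - 1, st.2) else (st.1, st.2 ++ [c]))
      (n, acc)).2 = acc ++ recA n l := by
  induction l generalizing n acc with
  | nil => simp [recA]
  | cons c l ih =>
    by_cases h : c = '.' ∧ n ≠ 1 <;> simp [List.foldl, h, ih, recA]

theorem recA_no_dot (l : List Char) (n : Int) (h : '.' ∉ l) : recA n l = l := by
  induction l generalizing n with
  | nil => rfl
  | cons c l ih =>
    simp only [List.mem_cons, not_or] at h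
    have hc : c ≠ '.' := fun e => h.1 e.symm
    simp [recA, hc, ih _ h.2]

theorem gSpec_no_dot (l : List Char) (h : '.' ∉ l) : gSpec l = l := by
  induction l with
  | nil => rfl
  | cons c l ih =>
    simp only [List.mem_cons, not_or] at h
    have hc : c ≠ '.' := fun e => h.1 e.symm
    simp [gSpec, hc, ih h.2]

theorem recA_eq_gSpec (l : List Char) (n : Int) (h : n = (l.count '.' : Int)) :
    recA n l = gSpec l := by
  induction l generalizing n with
  | nil => rfl
  | cons c l ih =>
    by_cases hc : c = '.'
    · subst hc
      rw [List.count_cons_self] at h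
      by_cases hd : '.' ∈ l
      · have hn : n ≠ 1 := by
          have : 0 < l.count '.' := List.count_pos_iff.mpr hd
          omega
        have h' : n - 1 = (l.count '.' : Int) := by push_cast; omega
        simp [recA, gSpec, hn, hd, ih _ h']
      · have h0 : l.count '.' = 0 := by simpa [List.count_eq_zero] using hd
        have hn : n = 1 := by omega
        simp [recA, gSpec, hn, hd, recA_no_dot l 1 hd, gSpec_no_dot l hd]
    · rw [List.count_cons_of_ne (by simpa using hc)] at h
      simp [recA, gSpec, hc, ih _ h]

theorem gSpec_count_one (l : List Char) (h : l.count '.' = 1) : gSpec l = l := by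
  induction l with
  | nil => rfl
  | cons c l ih =>
    by_cases hc : c = '.'
    · subst hc
      rw [List.count_cons_self] at h
      have hd : '.' ∉ l := by
        simpa [List.count_eq_zero] using (by omega : l.count '.' = 0)
      simp [gSpec, hd, gSpec_no_dot l hd]
    · rw [List.count_cons_of_ne (by simpa using hc)] at h
      simp [gSpec, hc, ih h]

theorem gSpec_append_nondot (l : List Char) (c : Char) (hc : c ≠ '.') :
    gSpec (l ++ [c]) = gSpec l ++ [c] := by
  induction l with
  | nil => simp [gSpec, hc]
  | cons a l ih =>
    by_cases h : a = '.' ∧ '.' ∈ l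
    · simp [gSpec, h.1, h.2, ih]
    · have hmem : ¬ (a = '.' ∧ '.' ∈ l ++ [c]) := by
        rintro ⟨h1, h2⟩
        rcases List.mem_append.mp h2 with h3 | h3
        · exact h ⟨h1, h3⟩
        · simp at h3; exact hc h3.symm
      simp only [List.cons_append, gSpec, if_neg hmem, if_neg h, ih]

theorem gSpec_append_dot (l : List Char) :
    gSpec (l ++ ['.']) = l.filter (· ≠ '.') ++ ['.'] := by
  induction l with
  | nil => simp [gSpec]
  | cons a l ih =>
    by_cases ha : a = '.'
    · simp [gSpec, ha, ih]
    · simp [gSpec, ha, ih, List.filter_cons]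

-- B's core on the character list
def bCore (l : List Char) : List Char :=
  match l.reverse.span (· ≠ '.') with
  | (_, []) => l
  | (tailRev, _ :: headRev) => (headRev.reverse.filter (· ≠ '.')) ++ '.' :: tailRev.reverse

theorem no_dot_of_dropWhile_nil (l : List Char)
    (hdw : l.reverse.dropWhile (· ≠ '.') = []) : '.' ∉ l := by
  intro hmem
  have hm : '.' ∈ l.reverse := by simpa using hmem
  rw [← List.takeWhile_append_dropWhile (p := (· ≠ '.')) (l := l.reverse), hdw,
    List.append_nil] at hm
  have := List.mem_takeWhile_imp hm
  simp at this

theorem bCore_cases (l : List Char) :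
    bCore l = match l.reverse.dropWhile (· ≠ '.') with
      | [] => l
      | _ :: headRev =>
          headRev.reverse.filter (· ≠ '.') ++ '.' :: (l.reverse.takeWhile (· ≠ '.')).reverse := by
  unfold bCore
  rw [List.span_eq_takeWhile_dropWhile]
  rcases l.reverse.dropWhile (· ≠ '.') with _ | ⟨d, h⟩ <;> rfl

theorem bCore_eq_gSpec (l : List Char) : bCore l = gSpec l := by
  induction l using List.reverseRecOn with
  | nil => rfl
  | append_singleton l c ih =>
    rw [bCore_cases] at ih ⊢
    by_cases hc : c = '.'
    · subst hc
      simp only [List.reverse_append, List.reverse_singleton, List.singleton_append,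
        List.dropWhile_cons]
      simp [gSpec_append_dot]
    · rcases hdw : l.reverse.dropWhile (· ≠ '.') with _ | ⟨d, h⟩ <;>
        simp only [ne_eq, decide_not] at hdw
      · have hnd : '.' ∉ l := no_dot_of_dropWhile_nil l (by simpa using hdw)
        simp [List.dropWhile_cons, hc, hdw, gSpec_append_nondot l c hc, gSpec_no_dot l hnd]
      · simp only [hdw] at ih
        rw [gSpec_append_nondot l c hc, ← ih]
        simp [List.dropWhile_cons, List.takeWhile_cons, hc, hdw]

theorem alt_eq_gSpec (s : String) :
    remove_multi_dots_alt s = String.ofList (gSpec s.toList) := by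
  have h := bCore_eq_gSpec s.toList
  unfold bCore at h
  unfold remove_multi_dots_alt
  rcases hsp : s.toList.reverse.span (· ≠ '.') with ⟨t, rest⟩
  rcases rest with _ | ⟨d, hd⟩
  · rw [hsp] at h
    simp only at h
    rw [← h]
    exact (String.ofList_toList).symm
  · rw [hsp] at h
    simp only at h
    rw [← h]

theorem remove_multi_dots_eq (s : String) :
    remove_multi_dots s = remove_multi_dots_alt s := by
  rw [alt_eq_gSpec]
  unfold remove_multi_dots
  simp only [foldl_count, zero_add]
  by_cases h1 : (s.toList.count '.' : Int) = 1
  · have : s.toList.count '.' = 1 := by exact_mod_cast h1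
    rw [if_pos h1, gSpec_count_one _ this]
    exact (String.ofList_toList).symm
  · rw [if_neg h1, foldl_recA, List.nil_append, recA_eq_gSpec _ _ rfl]

-- ===== VERDICT (by name: the statement is the Claim_ definition above) =====
theorem remove_multi_dots_spec : Claim_equal_remove_multi_dots := by
  intro s _
  unfold Spec_remove_multi_dots
  exact remove_multi_dots_eq s
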